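-- pv_equiv track=rewrite | github.com/shengcanxu/canoSpeech | text/ja_jp_phonemizer.py | combine_phonemes
-- ===== SOURCE A (Python) =====
-- def combine_phonemes(phonemes:list) -> list:
--     pre = None
--     combines = []
--     for phoneme in phonemes:
--         if pre is None:
--             pre = phoneme
--         elif phoneme == "N":
--             combines.append(pre + "N")
--             pre = None
--         elif phoneme == ":":
--             combines.append(pre + ":")
--             pre = None
--         elif phoneme == "i" and (pre[-1] == "a" or pre[-1] == "e"):  # ai, ei
--             combines.append(pre + "i")
--             pre = None
--         elif phoneme == "ɯ" and pre[-1] == "o":  # uo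
--             combines.append(pre + "ɯ")
--             pre = None
--         else:
--             combines.append(pre)
--             pre = phoneme
--
--     if pre is not None: combines.append(pre)
--     return combines
-- ===== SOURCE B (Python) =====
-- def _pair_up(chunk):
--     # greedily join the chunk into consecutive pairs, leftover single kept
--     if len(chunk) >= 2:
--         return [chunk[0] + chunk[1]] + _pair_up(chunk[2:])
--     return chunk[:]
--
--
-- def combine_phonemes(phonemes: list) -> list:
--     # Stage 1: combinability mask for each adjacent pair.
--     mask = [
--         b == "N" or b == ":"
--         or (b == "i" and (a[-1] == "a" or a[-1] == "e"))
--         or (b == "\u026f" and a[-1] == "o")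
--         for a, b in zip(phonemes, phonemes[1:])
--     ]
--     # Stage 2: split into maximal chunks chained by combinable adjacencies.
--     chunks = []
--     cur = phonemes[:1]
--     for m, p in zip(mask, phonemes[1:]):
--         if m:
--             cur.append(p)
--         else:
--             chunks.append(cur)
--             cur = [p]
--     if cur:
--         chunks.append(cur)
--     # Stage 3: pair up each chunk left to right.
--     return [u for c in chunks for u in _pair_up(c)]
-- ===== Notes on version B (the rewrite author's own statement) =====
-- stated objective: alternative
-- what changed: Replaces A's single stateful delayed-flush loop with a three-stage pipeline: compute a combinability mask over adjacent pairs, split the list into maximal chunks chained by combinable adjacencies, then greedily pair up each chunk left to right.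
import Mathlib
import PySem

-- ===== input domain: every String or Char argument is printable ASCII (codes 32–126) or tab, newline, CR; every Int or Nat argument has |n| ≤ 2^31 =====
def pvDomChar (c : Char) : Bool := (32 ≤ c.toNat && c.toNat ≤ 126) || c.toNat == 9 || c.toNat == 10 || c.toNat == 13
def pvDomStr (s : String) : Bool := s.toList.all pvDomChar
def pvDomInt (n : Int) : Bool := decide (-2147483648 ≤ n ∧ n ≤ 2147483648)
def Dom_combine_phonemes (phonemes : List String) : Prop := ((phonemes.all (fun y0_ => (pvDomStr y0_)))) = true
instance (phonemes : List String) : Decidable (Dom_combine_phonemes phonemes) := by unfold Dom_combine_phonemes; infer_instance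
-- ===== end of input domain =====

-- B replaces A's single stateful delayed-flush loop by three staged passes (adjacency mask, chunking, pairing up); objective: alternative, same cost.

-- ===== PORT A =====
-- pre[-1] in Python; `none` marks the IndexError case, excluded by Pre_ below
def pvLast (s : String) : Option Char := PySem.Str.pyGet? s (-1)

def combineStep (st : Option String × List String) (phoneme : String) :
    Option String × List String :=
  match st with
  | (none, combines) => (some phoneme, combines)
  | (some pre, combines) =>
    if phoneme = "N" then (none, combines ++ [pre ++ "N"])
    else if phoneme = ":" then (none, combines ++ [pre ++ ":"])
    else if phoneme = "i" ∧ (pvLast pre = some 'a' ∨ pvLast pre = some 'e') then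
      (none, combines ++ [pre ++ "i"])
    else if phoneme = "ɯ" ∧ pvLast pre = some 'o' then (none, combines ++ [pre ++ "ɯ"])
    else (some phoneme, combines ++ [pre])

def combine_phonemes (phonemes : List String) : List String :=
  let st := phonemes.foldl combineStep (none, [])
  match st.1 with
  | none => st.2
  | some pre => st.2 ++ [pre]

-- ===== PORT B =====
def pvCombinable (a b : String) : Bool :=
  b == "N" || b == ":" ||
    (b == "i" && (pvLast a == some 'a' || pvLast a == some 'e')) ||
    (b == "ɯ" && pvLast a == some 'o')

-- _pair_up in Source B
def pvPairUp : List String → List String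
  | a :: b :: r => (a ++ b) :: pvPairUp r
  | c => c

-- one iteration of Source B's chunking loop (state = (chunks, cur))
def pvChunkStep (st : List (List String) × List String) (mp : Bool × String) :
    List (List String) × List String :=
  if mp.1 then (st.1, st.2 ++ [mp.2]) else (st.1 ++ [st.2], [mp.2])

def combine_phonemes_alt (phonemes : List String) : List String :=
  let mask := (phonemes.zip phonemes.tail).map (fun p => pvCombinable p.1 p.2)
  let st := (mask.zip phonemes.tail).foldl pvChunkStep ([], phonemes.take 1)
  let chunks := if st.2 = [] then st.1 else st.1 ++ [st.2]
  chunks.flatMap pvPairUp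

-- ===== PRECONDITION & SPEC =====
-- Pre_ excludes only inputs on which Python A raises IndexError: an empty-string
-- phoneme immediately followed by "i" or "ɯ" makes A evaluate ""[-1] (B raises there too).
def Pre_combine_phonemes (phonemes : List String) : Prop :=
  ∀ p ∈ phonemes.zip phonemes.tail, ¬ (p.1 = "" ∧ (p.2 = "i" ∨ p.2 = "ɯ"))
instance (phonemes : List String) : Decidable (Pre_combine_phonemes phonemes) := by
  unfold Pre_combine_phonemes; infer_instance
def pvWitness_combine_phonemes : List String := ["k", "a", "N", "o"]

def Spec_combine_phonemes (phonemes : List String) (out : List String) : Prop :=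
  out = combine_phonemes_alt phonemes
instance (phonemes : List String) (out : List String) : Decidable (Spec_combine_phonemes phonemes out) := by
  unfold Spec_combine_phonemes; infer_instance

-- ===== CLAIM (what is proved, stated in full; the proofs are below) =====
def Claim_equal_combine_phonemes : Prop :=
  ∀ (phonemes : List String), Dom_combine_phonemes phonemes →
    Pre_combine_phonemes phonemes →
    Spec_combine_phonemes phonemes (combine_phonemes phonemes)

-- ===== LEMMAS AND PROOFS =====

-- the (mask, next-phoneme) list B's chunking loop folds over, written recursively
def pvZl : String → List String → List (Bool × String)
  | _, [] => []
  | x, y :: r => (pvCombinable x y, y) :: pvZl y r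

lemma mask_zip (rest : List String) : ∀ (x : String),
    ((((x :: rest).zip rest).map (fun p => pvCombinable p.1 p.2)).zip rest) = pvZl x rest := by
  induction rest with
  | nil => intro x; simp [pvZl]
  | cons y r ih => intro x; simp [pvZl, ih y]

-- prepend cur to the head chunk
def pvConsHead (cur : List String) : List (List String) → List (List String)
  | [] => [cur]
  | h :: t => (cur ++ h) :: t

-- the chunk list B computes, written recursively
def pvChunks : String → List String → List (List String)
  | x, [] => [[x]]
  | x, y :: r => if pvCombinable x y then pvConsHead [x] (pvChunks y r) else [x] :: pvChunks y r

lemma consHead_consHead (cur cur' : List String) (L : List (List String)) :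
    pvConsHead cur (pvConsHead cur' L) = pvConsHead (cur ++ cur') L := by
  cases L <;> simp [pvConsHead]

lemma chunks_head (y : String) (r : List String) :
    ∃ h t, pvChunks y r = (y :: h) :: t := by
  cases r with
  | nil => exact ⟨[], [], rfl⟩
  | cons z r' =>
    by_cases hc : pvCombinable y z = true
    · obtain ⟨h2, t2, he⟩ := chunks_head z r'
      exact ⟨z :: h2, t2, by simp [pvChunks, hc, he, pvConsHead]⟩
    · exact ⟨[], pvChunks z r', by simp [pvChunks, hc]⟩

-- fold characterization: B's loop computes pvChunks
lemma fold_chunks (rest : List String) : ∀ (x : String) (ch : List (List String)) (cur : List String),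
    ((pvZl x rest).foldl pvChunkStep (ch, cur ++ [x])).1 ++
        [((pvZl x rest).foldl pvChunkStep (ch, cur ++ [x])).2]
      = ch ++ pvConsHead cur (pvChunks x rest) ∧
    ((pvZl x rest).foldl pvChunkStep (ch, cur ++ [x])).2 ≠ [] := by
  induction rest with
  | nil => intro x ch cur; simp [pvZl, pvChunks, pvConsHead]
  | cons y r ih =>
    intro x ch cur
    by_cases hc : pvCombinable x y = true
    · have h2 := ih y ch (cur ++ [x])
      constructor
      · rw [show (pvZl x (y :: r)).foldl pvChunkStep (ch, cur ++ [x])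
              = (pvZl y r).foldl pvChunkStep (ch, (cur ++ [x]) ++ [y]) by
            simp [pvZl, hc, pvChunkStep]]
        rw [h2.1, pvChunks, if_pos hc, consHead_consHead]
      · rw [show (pvZl x (y :: r)).foldl pvChunkStep (ch, cur ++ [x])
              = (pvZl y r).foldl pvChunkStep (ch, (cur ++ [x]) ++ [y]) by
            simp [pvZl, hc, pvChunkStep]]
        exact h2.2
    · have h2 := ih y (ch ++ [cur ++ [x]]) []
      have hstep : (pvZl x (y :: r)).foldl pvChunkStep (ch, cur ++ [x])
          = (pvZl y r).foldl pvChunkStep (ch ++ [cur ++ [x]], [] ++ [y]) := by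
        simp [pvZl, hc, pvChunkStep]
      constructor
      · rw [hstep, h2.1, pvChunks, if_neg hc]
        obtain ⟨h', t', he⟩ := chunks_head y r
        simp [he, pvConsHead]
      · rw [hstep]; exact h2.2

-- the recursive merge specification both programs satisfy
def altRec : List String → List String
  | [] => []
  | [x] => [x]
  | x :: y :: r => if pvCombinable x y then (x ++ y) :: altRec r else x :: altRec (y :: r)

lemma chunks_pairUp (l : List String) :
    (match l with
     | [] => ([] : List String)
     | x :: rest => (pvChunks x rest).flatMap pvPairUp) = altRec l := by
  induction l using altRec.induct with
  | case1 => rfl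
  | case2 x => simp [pvChunks, pvPairUp, altRec]
  | case3 x y r hc ih =>
    simp only [altRec, if_pos hc]
    cases r with
    | nil => simp [pvChunks, hc, pvConsHead, pvPairUp, altRec]
    | cons z r' =>
      obtain ⟨h', t', he⟩ := chunks_head z r'
      by_cases hc2 : pvCombinable y z = true
      · simp only [pvChunks, if_pos hc, if_pos hc2, he, pvConsHead] at ih ⊢
        simp only [List.flatMap_cons] at ih ⊢
        rw [← ih]; simp [pvPairUp]
      · simp only [pvChunks, if_pos hc, if_neg hc2, pvConsHead] at ih ⊢
        simp only [List.flatMap_cons] at ih ⊢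
        rw [← ih]; simp [pvPairUp]
  | case4 x y r hc ih =>
    simp only [altRec, if_neg hc]
    simp only [pvChunks, if_neg hc, List.flatMap_cons, pvPairUp] at ih ⊢
    simp [ih]

-- B computes altRec
lemma alt_eq_altRec (l : List String) : combine_phonemes_alt l = altRec l := by
  cases l with
  | nil => rfl
  | cons x rest =>
    unfold combine_phonemes_alt
    simp only [List.tail_cons, List.take_succ_cons, List.take_zero, mask_zip rest x]
    have hf := fold_chunks rest x [] []
    obtain ⟨h', t', he⟩ := chunks_head x rest
    have hch : (if ((pvZl x rest).foldl pvChunkStep ([], [x])).2 = []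
          then ((pvZl x rest).foldl pvChunkStep ([], [x])).1
          else ((pvZl x rest).foldl pvChunkStep ([], [x])).1 ++
            [((pvZl x rest).foldl pvChunkStep ([], [x])).2]) = pvChunks x rest := by
      rw [if_neg (by simpa using hf.2)]
      have := hf.1
      simp only [List.nil_append] at this ⊢
      rw [this, he, pvConsHead]
      simp
    -- (cleanup)
    rw [hch]
    have := chunks_pairUp (x :: rest)
    simpa using this

-- pvCombinable as a proposition
lemma combinable_iff (a b : String) :
    pvCombinable a b = true ↔
      (b = "N" ∨ b = ":" ∨ (b = "i" ∧ (pvLast a = some 'a' ∨ pvLast a = some 'e')) ∨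
        (b = "ɯ" ∧ pvLast a = some 'o')) := by
  simp [pvCombinable, or_assoc]

def pvFinish (st : Option String × List String) : List String :=
  match st.1 with
  | none => st.2
  | some pre => st.2 ++ [pre]

lemma foldl_combineStep (l : List String) :
    ∀ (pre : Option String) (acc : List String),
      pvFinish (l.foldl combineStep (pre, acc)) =
        acc ++ (match pre with | none => altRec l | some x => altRec (x :: l)) := by
  induction l with
  | nil =>
    intro pre acc
    cases pre <;> simp [pvFinish, altRec]
  | cons p rest ih =>
    intro pre acc
    cases pre with
    | none =>
      simpa [combineStep] using ih (some p) acc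
    | some x =>
      by_cases h1 : p = "N"
      · subst h1
        have hc : pvCombinable x "N" = true := (combinable_iff x "N").2 (Or.inl rfl)
        simp [combineStep, altRec, hc, ih none (acc ++ [x ++ "N"])]
      · by_cases h2 : p = ":"
        · subst h2
          have hc : pvCombinable x ":" = true :=
            (combinable_iff x ":").2 (Or.inr (Or.inl rfl))
          simp [combineStep, h1, altRec, hc, ih none (acc ++ [x ++ ":"])]
        · by_cases h3 : p = "i" ∧ (pvLast x = some 'a' ∨ pvLast x = some 'e')
          · obtain ⟨hp, hl⟩ := h3
            subst hp
            have hc : pvCombinable x "i" = true :=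
              (combinable_iff x "i").2 (Or.inr (Or.inr (Or.inl ⟨rfl, hl⟩)))
            simp [combineStep, h1, h2, hl, altRec, hc, ih none (acc ++ [x ++ "i"])]
          · by_cases h4 : p = "ɯ" ∧ pvLast x = some 'o'
            · obtain ⟨hp, hl⟩ := h4
              subst hp
              have hc : pvCombinable x "ɯ" = true :=
                (combinable_iff x "ɯ").2 (Or.inr (Or.inr (Or.inr ⟨rfl, hl⟩)))
              simp [combineStep, h1, h2, hl, altRec, hc, ih none (acc ++ [x ++ "ɯ"])]
            · have hc : pvCombinable x p = false := by
                rw [← Bool.not_eq_true, combinable_iff]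
                tauto
              simp [combineStep, h1, h2, h3, h4, altRec, hc, ih (some p) (acc ++ [x])]

-- ===== VERDICT (by name: the statement is the Claim_ definition above) =====
theorem combine_phonemes_spec : Claim_equal_combine_phonemes := by
  intro phonemes _ _
  unfold Spec_combine_phonemes combine_phonemes
  rw [alt_eq_altRec]
  have h := foldl_combineStep phonemes none []
  simpa [pvFinish] using h
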